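-- pv_equiv track=rewrite | github.com/DataJJang/harness-foundry | templates/pwa-repo/scripts/show_start_path.py | latest_packet_path
-- ===== SOURCE A (Python) =====
-- def find_lane(workboard: dict | None, lane_id: str) -> dict | None:
--     if not workboard:
--         return None
--     for lane in workboard.get("workLanes", []):
--         if lane.get("id") == lane_id:
--             return lane
--     return None
--
-- def latest_packet_path(workboard: dict | None) -> str:
--     if not workboard:
--         return ""
--     design_lane = find_lane(workboard, "design-freeze")
--     if design_lane and design_lane.get("latestPacketPath"):
--         return design_lane["latestPacketPath"]
--     for lane in workboard.get("workLanes", []):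
--         if lane.get("latestPacketPath"):
--             return lane["latestPacketPath"]
--     return ""
-- ===== SOURCE B (Python) =====
-- def latest_packet_path(workboard: dict | None) -> str:
--     if not workboard:
--         return ""
--     design = None
--     fallback = ""
--     for lane in workboard.get("workLanes", []):
--         if design is None and lane.get("id") == "design-freeze":
--             design = lane
--         if not fallback and lane.get("latestPacketPath"):
--             fallback = lane["latestPacketPath"]
--     if design is not None and design.get("latestPacketPath"):
--         return design["latestPacketPath"]
--     return fallback
-- ===== Notes on version B (the rewrite author's own statement) =====
-- stated objective: alternative
-- what changed: Replaced the two sequential scans (find_lane helper plus a fallback loop) with one single pass that records the first design-freeze lane and, independently, the first truthy latestPacketPath, deciding priority after the loop.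
import Mathlib
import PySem

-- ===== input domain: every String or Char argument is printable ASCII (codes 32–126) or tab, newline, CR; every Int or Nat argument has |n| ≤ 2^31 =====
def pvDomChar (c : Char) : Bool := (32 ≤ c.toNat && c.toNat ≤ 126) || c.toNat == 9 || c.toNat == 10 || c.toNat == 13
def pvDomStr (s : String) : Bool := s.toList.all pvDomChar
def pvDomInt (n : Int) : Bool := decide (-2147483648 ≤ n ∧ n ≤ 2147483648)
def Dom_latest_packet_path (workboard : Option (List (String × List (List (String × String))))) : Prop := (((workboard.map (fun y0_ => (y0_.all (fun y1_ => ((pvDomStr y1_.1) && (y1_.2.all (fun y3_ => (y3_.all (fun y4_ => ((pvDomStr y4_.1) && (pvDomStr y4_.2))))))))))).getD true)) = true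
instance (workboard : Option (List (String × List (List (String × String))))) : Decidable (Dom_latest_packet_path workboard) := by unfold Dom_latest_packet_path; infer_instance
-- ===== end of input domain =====

-- B replaces A's two sequential scans (find_lane + fallback loop) with one single pass
-- recording the first design-freeze lane and the first truthy path; objective: alternative.

-- dict.get k (first-match lookup in an insertion-ordered association list); shared primitive
def dget {ν : Type} : List (String × ν) → String → Option ν
  | [], _ => none
  | (k, v) :: rest, key => if k = key then some v else dget rest key

-- Python truthiness of lane.get(...) for a string value
def struthy : Option String → Bool
  | none => false
  | some s => s ≠ ""

-- ===== PORT A =====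
-- for lane in ...: if lane.get("id") == lane_id: return lane  (from find_lane)
def findLaneLoop (lanes : List (List (String × String))) (laneId : String) :
    Option (List (String × String)) :=
  match lanes with
  | [] => none
  | lane :: rest =>
    if dget lane "id" = some laneId then some lane else findLaneLoop rest laneId

def find_lane (workboard : Option (List (String × List (List (String × String)))))
    (laneId : String) : Option (List (String × String)) :=
  match workboard with
  | none => none
  | some d => if d = [] then none else findLaneLoop ((dget d "workLanes").getD []) laneId

-- second loop of A: first lane with a truthy latestPacketPath
def scanLoop (lanes : List (List (String × String))) : String :=
  match lanes with
  | [] => ""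
  | lane :: rest =>
    if struthy (dget lane "latestPacketPath") then (dget lane "latestPacketPath").getD ""
    else scanLoop rest

def latest_packet_path (workboard : Option (List (String × List (List (String × String))))) : String :=
  match workboard with
  | none => ""
  | some d =>
    if d = [] then ""
    else
      match find_lane (some d) "design-freeze" with
      | some lane =>
        if lane ≠ [] ∧ struthy (dget lane "latestPacketPath") then
          (dget lane "latestPacketPath").getD ""
        else scanLoop ((dget d "workLanes").getD [])
      | none => scanLoop ((dget d "workLanes").getD [])

-- ===== PORT B =====
-- single pass: (first design-freeze lane so far, first truthy path so far)
def bLoop (lanes : List (List (String × String)))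
    (design : Option (List (String × String))) (fallback : String) :
    Option (List (String × String)) × String :=
  match lanes with
  | [] => (design, fallback)
  | lane :: rest =>
    let design' := match design with
      | none => if dget lane "id" = some "design-freeze" then some lane else none
      | some x => some x
    let fallback' :=
      if fallback = "" ∧ struthy (dget lane "latestPacketPath") then
        (dget lane "latestPacketPath").getD ""
      else fallback
    bLoop rest design' fallback'

def latest_packet_path_alt (workboard : Option (List (String × List (List (String × String))))) : String :=
  match workboard with
  | none => ""
  | some d =>
    if d = [] then ""
    else
      match bLoop ((dget d "workLanes").getD []) none "" with
      | (some lane, fallback) =>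
        if struthy (dget lane "latestPacketPath") then
          (dget lane "latestPacketPath").getD ""
        else fallback
      | (none, fallback) => fallback

-- ===== PRECONDITION & SPEC =====
def Spec_latest_packet_path (workboard : Option (List (String × List (List (String × String))))) (out : String) : Prop := out = latest_packet_path_alt workboard
instance (workboard : Option (List (String × List (List (String × String))))) (out : String) : Decidable (Spec_latest_packet_path workboard out) := by unfold Spec_latest_packet_path; infer_instance

-- ===== CLAIM (what is proved, stated in full; the proofs are below) =====
def Claim_equal_latest_packet_path : Prop := ∀ (workboard : Option (List (String × List (List (String × String))))), Dom_latest_packet_path workboard → Spec_latest_packet_path workboard (latest_packet_path workboard)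

-- ===== LEMMAS AND PROOFS =====

-- truthy lookup yields a nonempty path
theorem struthy_getD (o : Option String) (h : struthy o = true) : o.getD "" ≠ "" := by
  cases o with
  | none => simp [struthy] at h
  | some s => simpa [struthy] using h

-- the single pass computes exactly (find-loop result, scan-loop result)
theorem bLoop_inv (lanes : List (List (String × String)))
    (design : Option (List (String × String))) (fallback : String) :
    bLoop lanes design fallback =
      ((match design with
        | some x => some x
        | none => findLaneLoop lanes "design-freeze"),
       (if fallback = "" then scanLoop lanes else fallback)) := by
  induction lanes generalizing design fallback with
  | nil =>
    simp only [bLoop, scanLoop]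
    cases design <;> simp [findLaneLoop]
  | cons lane rest ih =>
    simp only [bLoop]
    rw [ih]
    by_cases ht : struthy (dget lane "latestPacketPath") = true
    · have hne := struthy_getD _ ht
      cases design with
      | none =>
        by_cases hid : dget lane "id" = some "design-freeze" <;>
        by_cases hf : fallback = "" <;>
          simp [hid, hf, ht, hne, findLaneLoop, scanLoop]
      | some x =>
        by_cases hf : fallback = "" <;> simp [hf, ht, hne, scanLoop]
    · cases design with
      | none =>
        by_cases hid : dget lane "id" = some "design-freeze" <;>
        by_cases hf : fallback = "" <;>
          simp [hid, hf, ht, findLaneLoop, scanLoop]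
      | some x =>
        by_cases hf : fallback = "" <;> simp [hf, ht, scanLoop]

-- a lane found by findLaneLoop has an "id" key, hence is nonempty
theorem findLaneLoop_ne_nil (lanes : List (List (String × String))) (laneId : String)
    (lane : List (String × String)) (h : findLaneLoop lanes laneId = some lane) :
    lane ≠ [] := by
  induction lanes with
  | nil => simp [findLaneLoop] at h
  | cons x rest ih =>
    simp only [findLaneLoop] at h
    split at h
    · rename_i hid
      cases h
      intro hnil
      subst hnil
      simp [dget] at hid
    · exact ih h

-- ===== VERDICT (by name: the statement is the Claim_ definition above) =====
theorem latest_packet_path_spec : Claim_equal_latest_packet_path := by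
  intro workboard _
  unfold Spec_latest_packet_path
  cases workboard with
  | none => rfl
  | some d =>
    by_cases hd : d = []
    · simp [latest_packet_path, latest_packet_path_alt, hd]
    · simp only [latest_packet_path, latest_packet_path_alt, hd]
      rw [bLoop_inv]
      simp only [find_lane, if_neg hd]
      cases h : findLaneLoop ((dget d "workLanes").getD []) "design-freeze" with
      | none => simp
      | some lane =>
        have hne := findLaneLoop_ne_nil _ _ _ h
        by_cases ht : struthy (dget lane "latestPacketPath") = true <;>
          simp [hne, ht]
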